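-- pv_equiv track=rewrite | github.com/tburkis1/Game-Finder | proj08.py | by_dev
-- ===== SOURCE A (Python) =====
-- from operator import itemgetter
--
-- def by_dev(master_D,developer):
--     '''Add games to a list with a given developer
--     Sort list
--     Return list'''
--     l = []
--     final = []
--
--     for key in master_D:
--         if developer in master_D[key][1]:
--             l.append((key, master_D[key][0][-4:]))
--
--     l = sorted(l, key=itemgetter(1),reverse = True)
--
--     for element in l:
--         final.append(element[0])
--
--     return final
-- ===== SOURCE B (Python) =====
-- def by_dev(master_D, developer):
--     '''Group matching games by release-year string, then emit groups in
--     descending date order; within-date insertion order is preserved, so the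
--     result equals a stable descending sort by date.'''
--     groups = {}
--     for key, val in master_D.items():
--         if developer in val[1]:
--             groups.setdefault(val[0][-4:], []).append(key)
--     out = []
--     for date in sorted(groups, reverse=True):
--         out.extend(groups[date])
--     return out
-- ===== Notes on version B (the rewrite author's own statement) =====
-- stated objective: alternative
-- what changed: B never builds or comparison-sorts a (key,date) pair list: one pass groups matching keys into a dict date->keys (preserving scan order), then the distinct dates are sorted descending and the groups concatenated, the stable within-date order emerging from the grouping instead of from a stable sort.
import Mathlib
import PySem

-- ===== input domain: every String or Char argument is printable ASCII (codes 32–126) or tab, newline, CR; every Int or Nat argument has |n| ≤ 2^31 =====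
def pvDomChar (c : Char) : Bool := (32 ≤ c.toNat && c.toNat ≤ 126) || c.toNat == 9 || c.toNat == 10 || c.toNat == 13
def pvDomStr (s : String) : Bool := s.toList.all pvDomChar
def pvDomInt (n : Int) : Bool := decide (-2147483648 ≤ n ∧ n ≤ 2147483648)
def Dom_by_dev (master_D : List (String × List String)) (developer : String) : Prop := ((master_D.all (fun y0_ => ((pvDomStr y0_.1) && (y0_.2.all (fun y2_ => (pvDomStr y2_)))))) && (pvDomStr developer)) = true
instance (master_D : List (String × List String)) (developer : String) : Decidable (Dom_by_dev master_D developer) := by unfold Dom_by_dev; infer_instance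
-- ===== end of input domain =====

-- B groups matching keys by date in a dict and concatenates the groups in descending date order,
-- instead of stably sorting a (key, date) pair list; alternative decomposition, same results.


-- ===== PORT A =====
def by_dev (master_D : List (String × List String)) (developer : String) : List String :=
  -- l = [];  for key in master_D: if developer in master_D[key][1]: l.append((key, master_D[key][0][-4:]))
  let l : List (String × String) := master_D.foldl (fun acc kv =>
      let v := (PySem.Dict.mk master_D).getD kv.1 []   -- master_D[key]; total under Pre_ (nodup keys)
      if PySem.Str.isIn developer (PySem.List.pyGetD v 1 "") then
        acc ++ [(kv.1, PySem.Str.slice (PySem.List.pyGetD v 0 "") (some (-4)) none)]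
      else acc) []
  -- l = sorted(l, key=itemgetter(1), reverse=True)
  let l2 := PySem.List.sorted l (fun e => e.2) true
  -- for element in l: final.append(element[0])
  l2.foldl (fun final e => final ++ [e.1]) []

-- ===== PORT B =====
def by_dev_alt (master_D : List (String × List String)) (developer : String) : List String :=
  -- groups = {}; for key, val in master_D.items(): if developer in val[1]: groups.setdefault(val[0][-4:], []).append(key)
  let groups : PySem.Dict String (List String) := master_D.foldl (fun g kv =>
      if PySem.Str.isIn developer (PySem.List.pyGetD kv.2 1 "") then
        g.modify (PySem.Str.slice (PySem.List.pyGetD kv.2 0 "") (some (-4)) none) [] (· ++ [kv.1])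
      else g) (PySem.Dict.mk [])
  -- out = []; for date in sorted(groups, reverse=True): out.extend(groups[date])
  (PySem.List.sorted groups.keys (fun d => d) true).foldl (fun out d => out ++ groups.getD d []) []

-- ===== PRECONDITION & SPEC =====
-- Pre_ excludes assoc lists with duplicate keys (a Python dict cannot contain them, so such a list
-- represents no dict input) and entries whose value list has fewer than 2 elements, on which A
-- raises IndexError at master_D[key][1].
def Pre_by_dev (master_D : List (String × List String)) (developer : String) : Prop :=
  (master_D.map Prod.fst).Nodup ∧ ∀ kv ∈ master_D, 2 ≤ kv.2.length
instance (master_D : List (String × List String)) (developer : String) : Decidable (Pre_by_dev master_D developer) := by unfold Pre_by_dev; infer_instance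

def pvWitness_by_dev : (List (String × List String)) × String :=
  ([("halo", ["Nov 15, 2001", "Bungie"]), ("myst", ["Sep 24, 1993", "Cyan"]), ("doom", ["Dec 10, 1993", "id Software"])], "Cyan")

def Spec_by_dev (master_D : List (String × List String)) (developer : String) (out : List String) : Prop := out = by_dev_alt master_D developer
instance (master_D : List (String × List String)) (developer : String) (out : List String) : Decidable (Spec_by_dev master_D developer out) := by unfold Spec_by_dev; infer_instance

-- ===== CLAIM (what is proved, stated in full; the proofs are below) =====
def Claim_equal_by_dev : Prop := ∀ (master_D : List (String × List String)) (developer : String), Dom_by_dev master_D developer → Pre_by_dev master_D developer → Spec_by_dev master_D developer (by_dev master_D developer)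

-- ===== LEMMAS AND PROOFS =====

-- first-match dict lookup of an own key, under nodup keys
lemma getD_mk_of_mem {κ ν : Type} [BEq κ] [LawfulBEq κ] (l : List (κ × ν)) (kv : κ × ν)
    (hnd : (l.map Prod.fst).Nodup) (h : kv ∈ l) (dflt : ν) :
    (PySem.Dict.mk l).getD kv.1 dflt = kv.2 := by
  induction l with
  | nil => cases h
  | cons p t ih =>
    simp only [List.map_cons, List.nodup_cons] at hnd
    rcases List.mem_cons.mp h with rfl | hm
    · simp [PySem.Dict.getD, PySem.Dict.get?, List.find?]
    · have hne : (p.1 == kv.1) = false := by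
        simp only [beq_eq_false_iff_ne]
        intro he
        exact hnd.1 (he ▸ List.mem_map_of_mem hm)
      simpa [PySem.Dict.getD, PySem.Dict.get?, List.find?, hne] using ih hnd.2 hm

lemma insertBy_skip {α : Type} (before : α → α → Bool) (x : α) (g r : List α)
    (h : ∀ y ∈ g, before x y = false) :
    PySem.List.insertBy before x (g ++ r) = g ++ PySem.List.insertBy before x r := by
  induction g with
  | nil => rfl
  | cons y t ih =>
    have hy : before x y = false := h y (by simp)
    simp [PySem.List.insertBy, hy, ih (fun z hz => h z (by simp [hz]))]

lemma insertBy_front {α : Type} (before : α → α → Bool) (x : α) (r : List α)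
    (h : ∀ y ∈ r, before x y = true) :
    PySem.List.insertBy before x r = x :: r := by
  cases r with
  | nil => rfl
  | cons y t => simp [PySem.List.insertBy, h y (by simp)]

lemma insert_grouped {α κ : Type} [LinearOrder κ] (key : α → κ) [BEq κ] [LawfulBEq κ]
    (ds : List κ) (hds : ds.Pairwise (fun a b => b < a)) (x : α) (hx : key x ∈ ds) (m : List α) :
    PySem.List.insertBy (fun a b => decide (key b < key a)) x
        (ds.flatMap (fun d => m.filter (fun y => key y == d)))
      = ds.flatMap (fun d => (m ++ [x]).filter (fun y => key y == d)) := by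
  induction ds with
  | nil => cases hx
  | cons d ds ih =>
    have hlt : ∀ d' ∈ ds, d' < d := by
      intro d' hd'; exact List.rel_of_pairwise_cons hds hd'
    by_cases hk : key x = d
    · have hrest : ∀ y ∈ ds.flatMap (fun d' => m.filter (fun z => key z == d')),
          (decide (key y < key x)) = true := by
        intro y hy
        rcases List.mem_flatMap.mp hy with ⟨d', hd', hyf⟩
        have : key y = d' := by simpa using (List.of_mem_filter hyf)
        simp [this, hk, hlt d' hd']
      have hgrp : ∀ y ∈ m.filter (fun z => key z == d), (decide (key y < key x)) = false := by
        intro y hy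
        have : key y = d := by simpa using (List.of_mem_filter hy)
        simp [this, hk]
      rw [List.flatMap_cons, insertBy_skip _ _ _ _ hgrp, insertBy_front _ _ _ hrest,
          List.flatMap_cons]
      have hds' : ∀ d' ∈ ds, (m ++ [x]).filter (fun z => key z == d')
          = m.filter (fun z => key z == d') := by
        intro d' hd'
        have : (key x == d') = false := by
          simp only [beq_eq_false_iff_ne]; intro he
          exact absurd (hk ▸ he ▸ hlt d' hd') (lt_irrefl _)
        simp [List.filter_append, this]
      have : (m ++ [x]).filter (fun z => key z == d)
          = m.filter (fun z => key z == d) ++ [x] := by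
        simp [List.filter_append, hk]
      rw [this, show ds.flatMap (fun d' => (m ++ [x]).filter (fun z => key z == d'))
            = ds.flatMap (fun d' => m.filter (fun z => key z == d'))
          from List.flatMap_congr hds']
      simp
    · have hx' : key x ∈ ds := by
        rcases List.mem_cons.mp hx with h | h
        · exact absurd h hk
        · exact h
      have hgrp : ∀ y ∈ m.filter (fun z => key z == d), (decide (key y < key x)) = false := by
        intro y hy
        have hyd : key y = d := by simpa using (List.of_mem_filter hy)
        have : key x < d := hlt _ hx'
        simp [hyd]; exact le_of_lt this
      rw [List.flatMap_cons, insertBy_skip _ _ _ _ hgrp, List.flatMap_cons,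
          ih (hds.sublist (List.sublist_cons_self d ds)) hx']
      have : (m ++ [x]).filter (fun z => key z == d) = m.filter (fun z => key z == d) := by
        have : (key x == d) = false := by simpa using hk
        simp [List.filter_append, this]
      rw [this]

lemma foldl_insert_grouped {α κ : Type} [LinearOrder κ] (key : α → κ) [BEq κ] [LawfulBEq κ]
    (ds : List κ) (hds : ds.Pairwise (fun a b => b < a)) :
    ∀ (l m : List α), (∀ x ∈ l, key x ∈ ds) →
    l.foldl (fun acc x => PySem.List.insertBy (fun a b => decide (key b < key a)) x acc)
        (ds.flatMap (fun d => m.filter (fun y => key y == d)))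
      = ds.flatMap (fun d => (m ++ l).filter (fun y => key y == d)) := by
  intro l
  induction l with
  | nil => intro m _; simp
  | cons x t ih =>
    intro m hl
    rw [List.foldl_cons, insert_grouped key ds hds x (hl x (by simp)) m,
        ih (m ++ [x]) (fun z hz => hl z (by simp [hz]))]
    simp

-- stable descending sort = concatenation of the scan-order groups over the strictly
-- descending list of distinct keys
lemma sorted_rev_eq_grouped {α κ : Type} [LinearOrder κ] [BEq κ] [LawfulBEq κ]
    (l : List α) (key : α → κ) :
    PySem.List.sorted l key true
      = (PySem.List.sorted (PySem.Set.ofList (l.map key)) (fun d => d) true).flatMap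
          (fun d => l.filter (fun y => key y == d)) := by
  set ds := PySem.List.sorted (PySem.Set.ofList (l.map key)) (fun d => d) true with hdsdef
  have hnd : ds.Nodup :=
    ((PySem.List.sorted_perm _ _ _).nodup_iff).mpr (PySem.Set.nodup_ofList _)
  have hge : ds.Pairwise (fun a b => b ≤ a) := PySem.List.sorted_pairwise_rev _ _
  have hds : ds.Pairwise (fun a b => b < a) := by
    have := hge.and hnd
    exact this.imp (fun h => lt_of_le_of_ne h.1 (Ne.symm h.2))
  have hmem : ∀ x ∈ l, key x ∈ ds := by
    intro x hx
    rw [hdsdef, PySem.List.mem_sorted, PySem.Set.mem_ofList]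
    exact List.mem_map_of_mem hx
  have h2 := foldl_insert_grouped key ds hds l [] (by simpa using hmem)
  have h3 : ds.flatMap (fun _ => ([] : List α)) = [] := by simp
  simp only [List.filter_nil, List.nil_append] at h2
  rw [h3] at h2
  rw [PySem.List.sorted_rev_eq_foldl_insertBy]
  exact h2

-- A's filtered pair list, under Pre_
lemma by_dev_eq (master_D : List (String × List String)) (developer : String)
    (hnd : (master_D.map Prod.fst).Nodup) :
    by_dev master_D developer
      = (PySem.List.sorted
          ((master_D.filter (fun kv => PySem.Str.isIn developer (PySem.List.pyGetD kv.2 1 ""))).map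
            (fun kv => (kv.1, PySem.Str.slice (PySem.List.pyGetD kv.2 0 "") (some (-4)) none)))
          (fun e => e.2) true).map Prod.fst := by
  unfold by_dev
  simp only []
  rw [PySem.List.foldl_congr_mem _ _ (fun acc kv =>
        if PySem.Str.isIn developer (PySem.List.pyGetD kv.2 1 "") then
          acc ++ [(kv.1, PySem.Str.slice (PySem.List.pyGetD kv.2 0 "") (some (-4)) none)]
        else acc) _
      (fun acc kv hkv => by
        simp only
        rw [getD_mk_of_mem master_D kv hnd hkv []])]
  simp only [PySem.List.foldl_append_if, PySem.List.foldl_append_singleton_eq_map]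
  simp

-- B as a flatMap of groups over its sorted distinct dates
lemma by_dev_alt_eq (master_D : List (String × List String)) (developer : String) :
    by_dev_alt master_D developer
      = (PySem.List.sorted
            (PySem.Set.ofList ((master_D.filter
                (fun kv => PySem.Str.isIn developer (PySem.List.pyGetD kv.2 1 ""))).map
              (fun kv => PySem.Str.slice (PySem.List.pyGetD kv.2 0 "") (some (-4)) none)))
            (fun d => d) true).flatMap
          (fun d => ((master_D.filter
              (fun kv => PySem.Str.isIn developer (PySem.List.pyGetD kv.2 1 ""))).filter
              (fun kv => PySem.Str.slice (PySem.List.pyGetD kv.2 0 "") (some (-4)) none == d)).map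
            Prod.fst) := by
  unfold by_dev_alt
  simp only
  rw [show (master_D.foldl (fun g kv =>
        if PySem.Str.isIn developer (PySem.List.pyGetD kv.2 1 "") then
          g.modify (PySem.Str.slice (PySem.List.pyGetD kv.2 0 "") (some (-4)) none) [] (· ++ [kv.1])
        else g) (PySem.Dict.mk []))
      = (master_D.filter (fun kv => PySem.Str.isIn developer (PySem.List.pyGetD kv.2 1 ""))).foldl
          (fun g kv => g.modify (PySem.Str.slice (PySem.List.pyGetD kv.2 0 "") (some (-4)) none) []
            (· ++ [kv.1])) (PySem.Dict.mk [])
    from PySem.List.foldl_if_eq_foldl_filter _ _ _ _]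
  set fl := master_D.filter (fun kv => PySem.Str.isIn developer (PySem.List.pyGetD kv.2 1 ""))
  set dte := fun kv : String × List String =>
      PySem.Str.slice (PySem.List.pyGetD kv.2 0 "") (some (-4)) none with hdte
  set G := fl.foldl (fun g kv => g.modify (dte kv) [] (· ++ [kv.1])) (PySem.Dict.mk []) with hG
  have hkeys : G.keys = PySem.Set.ofList (fl.map dte) := by
    rw [hG, PySem.Dict.keys_foldl_modify_key fl dte [] (fun _ kv v => v ++ [kv.1])]
    have : (PySem.Dict.mk ([] : List (String × List String))).keys = [] := rfl
    rw [this, PySem.Set.update_nil_left]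
  have hget : ∀ d, G.getD d [] = (fl.filter (fun kv => dte kv == d)).map Prod.fst := by
    intro d
    have := PySem.Dict.getD_foldl_modify_append (fl.map (fun kv => (dte kv, kv.1)))
        (PySem.Dict.mk []) d
    rw [List.foldl_map] at this
    rw [hG]
    have hz : (PySem.Dict.mk ([] : List (String × List String))).getD d [] = [] := rfl
    simpa [hz, List.filter_map, List.map_map, Function.comp] using this
  rw [PySem.List.foldl_append_eq_flatMap (fun d => G.getD d []), hkeys]
  simp only [List.nil_append]
  exact List.flatMap_congr (fun d _ => hget d)

-- ===== VERDICT (by name: the statement is the Claim_ definition above) =====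
theorem by_dev_spec : Claim_equal_by_dev := by
  intro master_D developer _hdom hpre
  unfold Spec_by_dev
  rw [by_dev_eq master_D developer hpre.1, by_dev_alt_eq master_D developer]
  rw [sorted_rev_eq_grouped]
  rw [List.map_flatMap]
  set fl := master_D.filter (fun kv => PySem.Str.isIn developer (PySem.List.pyGetD kv.2 1 ""))
  set dte := fun kv : String × List String =>
      PySem.Str.slice (PySem.List.pyGetD kv.2 0 "") (some (-4)) none
  have hkeymap : (fl.map (fun kv => ((kv.1 : String), dte kv))).map (fun e => e.2) = fl.map dte := by
    simp [List.map_map, Function.comp]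
  rw [hkeymap]
  refine List.flatMap_congr (fun d _ => ?_)
  rw [List.filter_map]
  simp [List.map_map, Function.comp_def]
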